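-- pv_equiv track=rewrite | github.com/ptarau/recursors | docdiver/rephrasers.py | collapse_similars
-- ===== SOURCE A (Python) =====
-- def collapse_similars(svos):
--     wdict = dict()
--     for svo in svos:
--         for w in svo:
--             wdict[w] = w
--     ws = list(wdict)
--     for w in ws:
--         plural = w + 's'
--         if plural in wdict:
--             wdict[plural] = w
--     svos = sorted(set((wdict[s], wdict[v], wdict[o]) for (s, v, o) in svos))
--     return svos
-- ===== SOURCE B (Python) =====
-- def _collapse(x, words):
--     return x[:-1] if x.endswith('s') and x[:-1] in words else x
--
--
-- def _insort_unique(out, t):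
--     # linear scan to t's position in the sorted accumulator; insert unless present
--     i = 0
--     while i < len(out) and out[i] < t:
--         i += 1
--     if i == len(out) or out[i] != t:
--         out.insert(i, t)
--
--
-- def collapse_similars(svos):
--     words = [w for t in svos for w in t]
--     out = []  # kept strictly sorted and duplicate-free throughout
--     for (s, v, o) in svos:
--         _insort_unique(out, (_collapse(s, words), _collapse(v, words), _collapse(o, words)))
--     return out
-- ===== Notes on version B (the rewrite author's own statement) =====
-- stated objective: alternative
-- what changed: B replaces A's dict-table construction and final sorted(set(...)) by a single online pass: no plural->singular table is built (each word is collapsed by probing the flat word list directly) and the result is produced by inserting each collapsed triple into a strictly-sorted duplicate-free accumulator (ordered insertion instead of hash-dedupe-then-sort).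
import Mathlib
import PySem

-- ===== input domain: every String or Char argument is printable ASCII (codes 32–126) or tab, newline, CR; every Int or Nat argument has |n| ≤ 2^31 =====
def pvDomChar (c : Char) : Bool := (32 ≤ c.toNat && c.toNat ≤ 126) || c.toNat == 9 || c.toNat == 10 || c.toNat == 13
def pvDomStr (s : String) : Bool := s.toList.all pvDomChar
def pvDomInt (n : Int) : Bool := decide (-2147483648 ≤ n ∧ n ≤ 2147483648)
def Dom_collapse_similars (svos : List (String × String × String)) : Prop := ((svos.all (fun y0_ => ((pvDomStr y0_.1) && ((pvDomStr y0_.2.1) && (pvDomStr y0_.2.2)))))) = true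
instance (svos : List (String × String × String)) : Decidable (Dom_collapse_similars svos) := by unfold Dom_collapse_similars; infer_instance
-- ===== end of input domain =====

-- B drops A's plural-table pass and the final sorted(set(...)): it collapses each word by probing the flat word list and inserts each collapsed triple into a strictly-sorted duplicate-free accumulator (alternative decomposition, same behaviour).


-- Python compares (str, str, str) tuples lexicographically: this key names that order
-- (shared by both ports, since both Pythons compare/sort such tuples the same way).
def pvKey3 (t : String × String × String) : String ×ₗ (String ×ₗ String) :=
  toLex (t.1, toLex (t.2.1, t.2.2))

-- ===== PORT A =====
def collapse_similars (svos : List (String × String × String)) : List (String × String × String) :=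
  -- wdict = dict(); for svo in svos: for w in svo: wdict[w] = w
  let d1 : PySem.Dict String String :=
    svos.foldl (fun d svo => [svo.1, svo.2.1, svo.2.2].foldl (fun d w => d.insert w w) d) PySem.Dict.empty
  -- ws = list(wdict)
  let ws := d1.keys
  -- for w in ws: plural = w + 's' (inlined); if plural in wdict: wdict[plural] = w
  let d2 := ws.foldl (fun d w => if d.contains (w ++ "s") then d.insert (w ++ "s") w else d) d1
  -- sorted(set((wdict[s], wdict[v], wdict[o]) for (s, v, o) in svos))
  -- wdict[x] never raises here: every component was inserted in the first loop, so
  -- getD's default "" is never used.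
  PySem.List.sorted
    (PySem.Set.ofList (svos.map (fun t => (d2.getD t.1 "", d2.getD t.2.1 "", d2.getD t.2.2 ""))))
    pvKey3

-- ===== PORT B =====
-- _collapse(x, words) = x[:-1] if x.endswith('s') and x[:-1] in words else x
def pvCollapse (words : List String) (x : String) : String :=
  if PySem.Str.endswith x "s" && decide (PySem.Str.slice x none (some (-1)) ∈ words)
  then PySem.Str.slice x none (some (-1)) else x

-- _insort_unique(out, t): walk past the elements below t, then insert t unless present
def pvInsort (t : String × String × String) :
    List (String × String × String) → List (String × String × String)
  | [] => [t]
  | y :: ys =>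
      if pvKey3 y < pvKey3 t then y :: pvInsort t ys
      else if y = t then y :: ys
      else t :: y :: ys

def collapse_similars_alt (svos : List (String × String × String)) : List (String × String × String) :=
  -- words = [w for t in svos for w in t]
  let words := svos.flatMap (fun t => [t.1, t.2.1, t.2.2])
  -- for (s, v, o) in svos: _insort_unique(out, (collapse s, collapse v, collapse o))
  svos.foldl
    (fun out t => pvInsort (pvCollapse words t.1, pvCollapse words t.2.1, pvCollapse words t.2.2) out)
    []

-- ===== PRECONDITION & SPEC =====
def Spec_collapse_similars (svos : List (String × String × String)) (out : List (String × String × String)) : Prop := out = collapse_similars_alt svos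
instance (svos : List (String × String × String)) (out : List (String × String × String)) : Decidable (Spec_collapse_similars svos out) := by unfold Spec_collapse_similars; infer_instance

-- ===== CLAIM (what is proved, stated in full; the proofs are below) =====
def Claim_equal_collapse_similars : Prop := ∀ (svos : List (String × String × String)), Dom_collapse_similars svos → Spec_collapse_similars svos (collapse_similars svos)

-- ===== LEMMAS AND PROOFS =====

-- the list of words A's first loop inserts (and B probes), in order
def pvAllW (svos : List (String × String × String)) : List String :=
  svos.flatMap (fun t => [t.1, t.2.1, t.2.2])

-- x = w ++ "s"  ↔  x ends in 's' and x[:-1] = w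
lemma pv_append_s_iff (w x : String) :
    x = w ++ "s" ↔ (PySem.Str.endswith x "s" = true ∧ PySem.Str.slice x none (some (-1)) = w) := by
  rw [← String.toList_inj, ← String.toList_inj (s₁ := PySem.Str.slice x none (some (-1))),
      PySem.Str.slice_to_neg_one, PySem.Str.endswith_eq, PySem.Chars.endswith_iff,
      String.toList_append]
  show x.toList = w.toList ++ ('s' :: "".toList) ↔ _
  simp only [String.toList_empty]
  constructor
  · rintro h
    rw [h]
    exact ⟨⟨w.toList, rfl⟩, List.dropLast_concat⟩
  · rintro ⟨⟨t, ht⟩, hd⟩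
    rw [← ht, ← hd]
    simp [← ht]

-- A's first loop: every inserted word maps to itself, nothing else is present
lemma pv_fold1_get? (l : List String) (d : PySem.Dict String String) (x : String) :
    (l.foldl (fun d w => d.insert w w) d).get? x = if x ∈ l then some x else d.get? x := by
  induction l generalizing d with
  | nil => simp
  | cons a l ih =>
      simp only [List.foldl_cons, ih, PySem.Dict.get?_insert, List.mem_cons]
      by_cases hx : x ∈ l <;> by_cases ha : x = a <;> simp [hx, ha]

lemma pv_d1_get? (svos : List (String × String × String)) (x : String) :
    (svos.foldl (fun d svo => [svo.1, svo.2.1, svo.2.2].foldl (fun d w => d.insert w w) d)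
      (PySem.Dict.empty : PySem.Dict String String)).get? x
    = if x ∈ pvAllW svos then some x else none := by
  rw [← List.foldl_flatMap, pv_fold1_get?, PySem.Dict.get?_empty]
  rfl

lemma pv_d1_contains (svos : List (String × String × String)) (y : String) :
    (svos.foldl (fun d svo => [svo.1, svo.2.1, svo.2.2].foldl (fun d w => d.insert w w) d)
      (PySem.Dict.empty : PySem.Dict String String)).contains y = decide (y ∈ pvAllW svos) := by
  rw [PySem.Dict.contains_eq_isSome_get?, pv_d1_get?]
  by_cases h : y ∈ pvAllW svos <;> simp [h]

-- A's second loop, characterised: key x is remapped to x[:-1] exactly when x ends in 's'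
-- and its stem was one of the iterated words (the key set never changes)
lemma pv_fold2_get? (W : List String) (l : List String) (d : PySem.Dict String String)
    (hc : ∀ y, d.contains y = decide (y ∈ W)) (x : String) :
    (l.foldl (fun d w => if d.contains (w ++ "s") then d.insert (w ++ "s") w else d) d).get? x
    = if PySem.Str.endswith x "s" = true ∧ PySem.Str.slice x none (some (-1)) ∈ l ∧ x ∈ W
      then some (PySem.Str.slice x none (some (-1))) else d.get? x := by
  induction l generalizing d with
  | nil => simp
  | cons a l ih =>
      have hstep : ∀ y, (if d.contains (a ++ "s") then d.insert (a ++ "s") a else d).contains y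
          = decide (y ∈ W) := by
        intro y
        by_cases h : d.contains (a ++ "s") = true
        · simp only [h, if_true, PySem.Dict.contains_insert]
          by_cases hy : y = a ++ "s"
          · subst hy
            simp only [beq_self_eq_true, Bool.true_or]
            rw [h.symm.trans (hc _)]
          · simp [hy, hc]
        · simp only [Bool.not_eq_true] at h
          simp [h, hc]
      rw [List.foldl_cons, ih _ hstep]
      by_cases hP : PySem.Str.endswith x "s" = true ∧ PySem.Str.slice x none (some (-1)) ∈ l ∧ x ∈ W
      · simp only [hP]
        have : PySem.Str.endswith x "s" = true ∧ PySem.Str.slice x none (some (-1)) ∈ a :: l ∧ x ∈ W :=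
          ⟨hP.1, List.mem_cons_of_mem _ hP.2.1, hP.2.2⟩
        simp [this]
      · simp only [hP, if_false]
        by_cases hQ : PySem.Str.endswith x "s" = true ∧ PySem.Str.slice x none (some (-1)) = a ∧ x ∈ W
        · have hx : x = a ++ "s" := (pv_append_s_iff a x).mpr ⟨hQ.1, hQ.2.1⟩
          have hcon : d.contains (a ++ "s") = true := by
            rw [← hx, hc]; simp [hQ.2.2]
          have hcond : PySem.Str.endswith x "s" = true ∧ PySem.Str.slice x none (some (-1)) ∈ a :: l ∧ x ∈ W :=
            ⟨hQ.1, by simp [hQ.2.1], hQ.2.2⟩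
          rw [if_pos hcond, hQ.2.1, ← hx] at *
          simp [hcon, PySem.Dict.get?_insert_self]
        · have hcond : ¬ (PySem.Str.endswith x "s" = true ∧ PySem.Str.slice x none (some (-1)) ∈ a :: l ∧ x ∈ W) := by
            rintro ⟨h1, h2, h3⟩
            rcases List.mem_cons.mp h2 with h | h
            · exact hQ ⟨h1, h, h3⟩
            · exact hP ⟨h1, h, h3⟩
          simp only [hcond, if_false]
          by_cases h : d.contains (a ++ "s") = true
          · simp only [h, if_true, PySem.Dict.get?_insert]
            have hxne : x ≠ a ++ "s" := by
              intro hx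
              have hiff := (pv_append_s_iff a x).mp hx
              have hdx : d.contains x = true := by rw [hx]; exact h
              have hw : x ∈ W := of_decide_eq_true ((hc x).symm.trans hdx)
              exact hQ ⟨hiff.1, hiff.2, hw⟩
            simp [hxne]
          · simp only [Bool.not_eq_true] at h
            simp [h]

-- the final dict of A agrees with B's _collapse on every word that occurs in svos
lemma pv_getD_eq_collapse (svos : List (String × String × String)) (x : String)
    (hx : x ∈ pvAllW svos) :
    (((svos.foldl (fun d svo => [svo.1, svo.2.1, svo.2.2].foldl (fun d w => d.insert w w) d)
        (PySem.Dict.empty : PySem.Dict String String)).keys).foldl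
      (fun d w => if d.contains (w ++ "s") then d.insert (w ++ "s") w else d)
      (svos.foldl (fun d svo => [svo.1, svo.2.1, svo.2.2].foldl (fun d w => d.insert w w) d)
        (PySem.Dict.empty : PySem.Dict String String))).getD x ""
    = pvCollapse (pvAllW svos) x := by
  set d1 := svos.foldl (fun d svo => [svo.1, svo.2.1, svo.2.2].foldl (fun d w => d.insert w w) d)
      (PySem.Dict.empty : PySem.Dict String String) with hd1
  have hget : ∀ y, d1.get? y = if y ∈ pvAllW svos then some y else none := fun y => pv_d1_get? svos y
  have hcont : ∀ y, d1.contains y = decide (y ∈ pvAllW svos) := pv_d1_contains svos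
  have hkeys : ∀ y, y ∈ d1.keys ↔ y ∈ pvAllW svos := by
    intro y; rw [← PySem.Dict.contains_iff_mem_keys, hcont]; simp
  rw [PySem.Dict.getD_eq_get?_getD, pv_fold2_get? (pvAllW svos) _ _ hcont x]
  unfold pvCollapse
  by_cases hE : PySem.Str.endswith x "s" = true
  · by_cases hS : PySem.Str.slice x none (some (-1)) ∈ pvAllW svos
    · simp only [hkeys, hget, hE, hS, hx]
      simp
    · simp only [hkeys, hget, hE, hS, hx]
      simp
  · simp only [Bool.not_eq_true] at hE
    simp only [hkeys, hget, hE, hx]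
    simp

-- pvKey3 is injective (tuple equality ↔ key equality)
lemma pv_key3_inj {a b : String × String × String} (h : pvKey3 a = pvKey3 b) : a = b := by
  unfold pvKey3 at h
  have h1 := toLex.injective h
  have h2 := toLex.injective (congrArg Prod.snd h1)
  obtain ⟨a1, a2, a3⟩ := a
  obtain ⟨b1, b2, b3⟩ := b
  simp_all

-- membership through pvInsort
lemma pv_mem_insort (t z : String × String × String) (l : List (String × String × String)) :
    z ∈ pvInsort t l ↔ z = t ∨ z ∈ l := by
  induction l with
  | nil => simp [pvInsort]
  | cons y ys ih =>
      unfold pvInsort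
      split_ifs with h1 h2
      · simp only [List.mem_cons, ih]; tauto
      · subst h2; simp only [List.mem_cons]; tauto
      · simp only [List.mem_cons]

-- pvInsort keeps the accumulator strictly sorted
lemma pv_insort_pairwise (t : String × String × String) (l : List (String × String × String))
    (h : l.Pairwise (fun a b => pvKey3 a < pvKey3 b)) :
    (pvInsort t l).Pairwise (fun a b => pvKey3 a < pvKey3 b) := by
  induction l with
  | nil => simp [pvInsort]
  | cons y ys ih =>
      rw [List.pairwise_cons] at h
      obtain ⟨hy, hys⟩ := h
      unfold pvInsort
      split_ifs with h1 h2
      · rw [List.pairwise_cons]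
        refine ⟨?_, ih hys⟩
        intro z hz
        rcases (pv_mem_insort t z ys).mp hz with rfl | hz
        · exact h1
        · exact hy z hz
      · subst h2
        exact List.pairwise_cons.mpr ⟨hy, hys⟩
      · have hlt : pvKey3 t < pvKey3 y := by
          rcases lt_trichotomy (pvKey3 t) (pvKey3 y) with h | h | h
          · exact h
          · exact absurd (pv_key3_inj h.symm) h2
          · exact absurd h h1
        rw [List.pairwise_cons]
        refine ⟨?_, List.pairwise_cons.mpr ⟨hy, hys⟩⟩
        intro z hz
        rcases List.mem_cons.mp hz with rfl | hz
        · exact hlt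
        · exact lt_trans hlt (hy z hz)

-- on a strictly sorted accumulator, pvInsort is set-insertion up to permutation
lemma pv_insort_perm (t : String × String × String) (l : List (String × String × String))
    (h : l.Pairwise (fun a b => pvKey3 a < pvKey3 b)) :
    (pvInsort t l).Perm (PySem.Set.add l t) := by
  induction l with
  | nil => simp [pvInsort, PySem.Set.add, PySem.Set.contains]
  | cons y ys ih =>
      rw [List.pairwise_cons] at h
      obtain ⟨hy, hys⟩ := h
      unfold pvInsort
      split_ifs with h1 h2
      · have hyt : y ≠ t := fun he => absurd (he ▸ h1) (lt_irrefl _)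
        by_cases hm : t ∈ ys
        · have hadd : PySem.Set.add (y :: ys) t = y :: ys := by
            simp [PySem.Set.add, PySem.Set.contains, hm]
          have hadd2 : PySem.Set.add ys t = ys := by
            simp [PySem.Set.add, PySem.Set.contains, hm]
          rw [hadd]
          have hih := ih hys
          rw [hadd2] at hih
          exact List.Perm.cons y hih
        · have hadd : PySem.Set.add (y :: ys) t = y :: (ys ++ [t]) := by
            simp [PySem.Set.add, PySem.Set.contains, hm, Ne.symm hyt]
          have hadd2 : PySem.Set.add ys t = ys ++ [t] := by
            simp [PySem.Set.add, PySem.Set.contains, hm]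
          rw [hadd]
          have hih := ih hys
          rw [hadd2] at hih
          exact List.Perm.cons y hih
      · subst h2
        simp [PySem.Set.add, PySem.Set.contains]
      · have hlt : pvKey3 t < pvKey3 y := by
          rcases lt_trichotomy (pvKey3 t) (pvKey3 y) with h | h | h
          · exact h
          · exact absurd (pv_key3_inj h.symm) h2
          · exact absurd h h1
        have hm : t ∉ ys := by
          intro hm
          exact absurd (hy t hm) (not_lt_of_gt hlt)
        have hm2 : t ∉ y :: ys := by
          intro hmem
          rcases List.mem_cons.mp hmem with he | he
          · exact h2 he.symm
          · exact hm he
        have hadd : PySem.Set.add (y :: ys) t = (y :: ys) ++ [t] := by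
          simp [PySem.Set.add, PySem.Set.contains, hm2]
        rw [hadd]
        exact (List.perm_append_singleton t (y :: ys)).symm

-- Set.add is a congruence for permutations (stated at the triple type the ports use)
lemma pv_foldl_add_perm (l a b : List (String × String × String)) (hp : a.Perm b) :
    (l.foldl PySem.Set.add a).Perm (l.foldl PySem.Set.add b) := by
  induction l generalizing a b with
  | nil => exact hp
  | cons x l ih =>
      simp only [List.foldl_cons]
      apply ih
      by_cases h : x ∈ b
      · have hxa : x ∈ a := hp.mem_iff.mpr h
        have ha : PySem.Set.add a x = a := by
          simp [PySem.Set.add, PySem.Set.contains, hxa]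
        have hb : PySem.Set.add b x = b := by
          simp [PySem.Set.add, PySem.Set.contains, h]
        rw [ha, hb]
        exact hp
      · have hxa : x ∉ a := fun hm => h (hp.mem_iff.mp hm)
        have ha : PySem.Set.add a x = a ++ [x] := by
          simp [PySem.Set.add, PySem.Set.contains, hxa]
        have hb : PySem.Set.add b x = b ++ [x] := by
          simp [PySem.Set.add, PySem.Set.contains, h]
        rw [ha, hb]
        exact hp.append_right [x]

-- B's fold is (a permutation of) set(l), strictly sorted
lemma pv_foldl_insort (l : List (String × String × String)) :
    (l.foldl (fun out t => pvInsort t out) []).Pairwise (fun a b => pvKey3 a < pvKey3 b)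
    ∧ (l.foldl (fun out t => pvInsort t out) []).Perm (PySem.Set.ofList l) := by
  rw [PySem.Set.ofList_eq_foldl]
  suffices h : ∀ (acc : List (String × String × String)),
      acc.Pairwise (fun a b => pvKey3 a < pvKey3 b) →
      (l.foldl (fun out t => pvInsort t out) acc).Pairwise (fun a b => pvKey3 a < pvKey3 b)
      ∧ (l.foldl (fun out t => pvInsort t out) acc).Perm (l.foldl PySem.Set.add acc) by
    exact h [] List.Pairwise.nil
  induction l with
  | nil => intro acc hacc; exact ⟨hacc, List.Perm.refl _⟩
  | cons x l ih =>
      intro acc hacc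
      simp only [List.foldl_cons]
      obtain ⟨hpw, hperm⟩ := ih (pvInsort x acc) (pv_insort_pairwise x acc hacc)
      exact ⟨hpw, hperm.trans (pv_foldl_add_perm l _ _ (pv_insort_perm x acc hacc))⟩

-- ===== VERDICT (by name: the statement is the Claim_ definition above) =====
theorem collapse_similars_spec : Claim_equal_collapse_similars := by
  intro svos _
  unfold Spec_collapse_similars collapse_similars collapse_similars_alt
  dsimp only
  have hmap : svos.map (fun t => ((((svos.foldl (fun d svo => [svo.1, svo.2.1, svo.2.2].foldl (fun d w => d.insert w w) d)
        (PySem.Dict.empty : PySem.Dict String String)).keys).foldl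
      (fun d w => if d.contains (w ++ "s") then d.insert (w ++ "s") w else d)
      (svos.foldl (fun d svo => [svo.1, svo.2.1, svo.2.2].foldl (fun d w => d.insert w w) d)
        (PySem.Dict.empty : PySem.Dict String String))).getD t.1 "", (((svos.foldl (fun d svo => [svo.1, svo.2.1, svo.2.2].foldl (fun d w => d.insert w w) d)
        (PySem.Dict.empty : PySem.Dict String String)).keys).foldl
      (fun d w => if d.contains (w ++ "s") then d.insert (w ++ "s") w else d)
      (svos.foldl (fun d svo => [svo.1, svo.2.1, svo.2.2].foldl (fun d w => d.insert w w) d)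
        (PySem.Dict.empty : PySem.Dict String String))).getD t.2.1 "", (((svos.foldl (fun d svo => [svo.1, svo.2.1, svo.2.2].foldl (fun d w => d.insert w w) d)
        (PySem.Dict.empty : PySem.Dict String String)).keys).foldl
      (fun d w => if d.contains (w ++ "s") then d.insert (w ++ "s") w else d)
      (svos.foldl (fun d svo => [svo.1, svo.2.1, svo.2.2].foldl (fun d w => d.insert w w) d)
        (PySem.Dict.empty : PySem.Dict String String))).getD t.2.2 ""))
      = svos.map (fun t => (pvCollapse (pvAllW svos) t.1, pvCollapse (pvAllW svos) t.2.1,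
          pvCollapse (pvAllW svos) t.2.2)) := by
    apply List.map_congr_left
    intro t ht
    have h1 : t.1 ∈ pvAllW svos := List.mem_flatMap.mpr ⟨t, ht, by simp⟩
    have h2 : t.2.1 ∈ pvAllW svos := List.mem_flatMap.mpr ⟨t, ht, by simp⟩
    have h3 : t.2.2 ∈ pvAllW svos := List.mem_flatMap.mpr ⟨t, ht, by simp⟩
    rw [pv_getD_eq_collapse svos t.1 h1, pv_getD_eq_collapse svos t.2.1 h2,
        pv_getD_eq_collapse svos t.2.2 h3]
  rw [hmap]
  have hfold := pv_foldl_insort (svos.map (fun t => (pvCollapse (pvAllW svos) t.1,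
      pvCollapse (pvAllW svos) t.2.1, pvCollapse (pvAllW svos) t.2.2)))
  rw [List.foldl_map] at hfold
  have hgoal := PySem.List.sorted_eq_of_perm_of_pairwise_lt _ _ pvKey3 hfold.2 hfold.1
  simpa [pvAllW] using hgoal
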